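-- pv_equiv track=rewrite | github.com/Kingsley1116/Explore-the-Mystery-of-Lotus-Island | C_葡撻工廠的產能/generate_tart_capacity_data.py | find_best_purchase
-- ===== SOURCE A (Python) =====
-- def calculate_max_tarts(A, B, C):
--     """计算当前材料能制作的最大葡挞数量"""
--     flour_tarts = A // 30
--     egg_tarts = B // 2
--     milk_tarts = C // 50
--     return min(flour_tarts, egg_tarts, milk_tarts)
--
-- def find_best_purchase(A, B, C, k, x):
--     """
--     寻找最佳采购方案，返回k天后能制作的最多葡挞数量
--     使用贪心算法：每次采购最能提高产能的材料
--     """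
--     a, b, c = A, B, C
--
--     for _ in range(k):
--         # 计算当前每种材料能制作的葡挞数量
--         flour_tarts = a // 30
--         egg_tarts = b // 2
--         milk_tarts = c // 50
--
--         current_min = min(flour_tarts, egg_tarts, milk_tarts)
--
--         # 计算采购每种材料后的最小产能
--         if flour_tarts == current_min:
--             a += x
--
--         elif egg_tarts == current_min:
--             b += x
--
--         elif milk_tarts == current_min:
--             c += x
--
--     # 返回最终能制作的葡挞数量
--     return calculate_max_tarts(a, b, c)
-- ===== SOURCE B (Python) =====
-- def find_best_purchase(A, B, C, k, x):
--     def purchases_needed(t):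
--         need = 0
--         for stock, per in ((A, 30), (B, 2), (C, 50)):
--             short = per * t - stock
--             if short > 0:
--                 need += -(-short // x)
--         return need
--
--     lo = min(A // 30, B // 2, C // 50)
--     hi = lo + k * x
--     while lo < hi:
--         mid = (lo + hi + 1) // 2
--         if purchases_needed(mid) <= k:
--             lo = mid
--         else:
--             hi = mid - 1
--     return lo
-- ===== Notes on version B (the rewrite author's own statement) =====
-- stated objective: faster
-- what changed: Replaced the O(k) step-by-step greedy simulation by a binary search over the achievable tart count with a closed-form feasibility check (ceil-divided purchases needed per material); Pre_ restricts to nonnegative purchase amounts x, the task's natural domain, excluding negative x on which A simulates k material-draining 'purchases'.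
-- outside the precondition, e.g. on find_best_purchase(60, 4, 100, 2, -30): A returns 0, B returns 2
import Mathlib
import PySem

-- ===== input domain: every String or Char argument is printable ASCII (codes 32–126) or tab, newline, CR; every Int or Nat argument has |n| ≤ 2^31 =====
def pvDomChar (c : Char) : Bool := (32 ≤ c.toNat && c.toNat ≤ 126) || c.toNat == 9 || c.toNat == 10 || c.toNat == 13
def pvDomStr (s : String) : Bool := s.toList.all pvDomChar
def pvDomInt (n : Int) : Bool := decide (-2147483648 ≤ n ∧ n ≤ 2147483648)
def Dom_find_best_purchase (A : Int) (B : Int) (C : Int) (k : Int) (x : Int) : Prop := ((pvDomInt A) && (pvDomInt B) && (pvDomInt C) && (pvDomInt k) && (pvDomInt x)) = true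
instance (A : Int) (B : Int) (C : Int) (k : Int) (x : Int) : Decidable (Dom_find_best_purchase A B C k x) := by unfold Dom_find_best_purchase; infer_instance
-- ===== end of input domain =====

-- B replaces A's O(k) greedy simulation by a binary search on the achievable tart
-- count with a closed-form purchase-cost feasibility check.

-- ===== PORT A =====
def calculate_max_tarts (A : Int) (B : Int) (C : Int) : Int :=
  let flour_tarts := PySem.Int.floordiv A 30
  let egg_tarts := PySem.Int.floordiv B 2
  let milk_tarts := PySem.Int.floordiv C 50
  min (min flour_tarts egg_tarts) milk_tarts

-- the 'for _ in range(k)' loop of A, one structural step per iteration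
def pvLoopA : Nat → Int → Int → Int → Int → Int × Int × Int
  | 0, a, b, c, _ => (a, b, c)
  | n+1, a, b, c, x =>
    let flour_tarts := PySem.Int.floordiv a 30
    let egg_tarts := PySem.Int.floordiv b 2
    let milk_tarts := PySem.Int.floordiv c 50
    let current_min := min (min flour_tarts egg_tarts) milk_tarts
    if flour_tarts = current_min then pvLoopA n (a + x) b c x
    else if egg_tarts = current_min then pvLoopA n a (b + x) c x
    else if milk_tarts = current_min then pvLoopA n a b (c + x) x
    else pvLoopA n a b c x

def find_best_purchase (A : Int) (B : Int) (C : Int) (k : Int) (x : Int) : Int :=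
  let s := pvLoopA k.toNat A B C x
  calculate_max_tarts s.1 s.2.1 s.2.2

-- ===== PORT B =====
-- purchases_needed(t) of Source B: purchases so that every material supports t tarts
def pvCost (A : Int) (B : Int) (C : Int) (x : Int) (t : Int) : Int :=
  List.foldl (fun need (p : Int × Int) =>
      let short := p.2 * t - p.1
      if short > 0 then need + -(PySem.Int.floordiv (-short) x) else need)
    0 [(A, 30), (B, 2), (C, 50)]

-- the 'while lo < hi' binary-search loop of Source B (mid written inline)
def pvBS (A : Int) (B : Int) (C : Int) (k : Int) (x : Int) (lo : Int) (hi : Int) : Int :=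
  if h : lo < hi then
    if pvCost A B C x (PySem.Int.floordiv (lo + hi + 1) 2) ≤ k then
      pvBS A B C k x (PySem.Int.floordiv (lo + hi + 1) 2) hi
    else
      pvBS A B C k x lo (PySem.Int.floordiv (lo + hi + 1) 2 - 1)
  else lo
termination_by (hi - lo).toNat
decreasing_by
  all_goals
    have hm := PySem.Int.floordiv_two_mid_bounds (show lo + 1 ≤ hi by omega)
    rw [show lo + 1 + hi = lo + hi + 1 by ring] at hm
    omega

def find_best_purchase_alt (A : Int) (B : Int) (C : Int) (k : Int) (x : Int) : Int :=
  let lo := min (min (PySem.Int.floordiv A 30) (PySem.Int.floordiv B 2)) (PySem.Int.floordiv C 50)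
  pvBS A B C k x lo (lo + k * x)

-- ===== PRECONDITION & SPEC =====
-- Pre_ restricts to nonnegative purchase amounts x — the task's natural domain
-- (a purchase adds material); for negative x A returns the result of k forced
-- material-draining 'purchases', which B does not model.
def Pre_find_best_purchase (A : Int) (B : Int) (C : Int) (k : Int) (x : Int) : Prop := 0 ≤ x
instance (A : Int) (B : Int) (C : Int) (k : Int) (x : Int) : Decidable (Pre_find_best_purchase A B C k x) := by unfold Pre_find_best_purchase; infer_instance
def pvWitness_find_best_purchase : Int × Int × Int × Int × Int := (100, 10, 200, 3, 5)
def Spec_find_best_purchase (A : Int) (B : Int) (C : Int) (k : Int) (x : Int) (out : Int) : Prop := out = find_best_purchase_alt A B C k x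
instance (A : Int) (B : Int) (C : Int) (k : Int) (x : Int) (out : Int) : Decidable (Spec_find_best_purchase A B C k x out) := by unfold Spec_find_best_purchase; infer_instance

-- ===== CLAIM (what is proved, stated in full; the proofs are below) =====
def Claim_equal_find_best_purchase : Prop := ∀ (A : Int) (B : Int) (C : Int) (k : Int) (x : Int), Dom_find_best_purchase A B C k x → Pre_find_best_purchase A B C k x → Spec_find_best_purchase A B C k x (find_best_purchase A B C k x)

-- ===== LEMMAS AND PROOFS =====

-- proof-side abbreviations
def pvNeed (s d T x : Int) : Int :=
  if d * T - s > 0 then -(PySem.Int.floordiv (-(d * T - s)) x) else 0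

def gmin (a b c : Int) : Int :=
  min (min (PySem.Int.floordiv a 30) (PySem.Int.floordiv b 2)) (PySem.Int.floordiv c 50)

theorem pvCost_eq (A B C x T : Int) :
    pvCost A B C x T = pvNeed A 30 T x + pvNeed B 2 T x + pvNeed C 50 T x := by
  simp only [pvCost, pvNeed, List.foldl]
  split_ifs <;> ring

theorem pvNeed_le_iff {x : Int} (hx : 0 < x) {s d T n : Int} (hn : 0 ≤ n) :
    pvNeed s d T x ≤ n ↔ d * T ≤ s + n * x := by
  unfold pvNeed
  split_ifs with h
  · have hc := (PySem.Int.neg_floordiv_neg_eq_iff_of_pos (a := d * T - s)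
      (q := -(PySem.Int.floordiv (-(d * T - s)) x)) hx).mp rfl
    constructor
    · intro hqn
      have := mul_le_mul_of_nonneg_right hqn (le_of_lt hx)
      nlinarith [hc.2]
    · intro hD
      have h1 : (-(PySem.Int.floordiv (-(d * T - s)) x) - 1) * x < n * x := by nlinarith [hc.1]
      have := lt_of_mul_lt_mul_right h1 (le_of_lt hx)
      omega
  · constructor
    · intro _; nlinarith [mul_nonneg hn (le_of_lt hx)]
    · intro _; exact hn

theorem pvNeed_nonneg {x : Int} (hx : 0 < x) (s d T : Int) : 0 ≤ pvNeed s d T x := by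
  unfold pvNeed
  split_ifs with h
  · have hc := (PySem.Int.neg_floordiv_neg_eq_iff_of_pos (a := d * T - s)
      (q := -(PySem.Int.floordiv (-(d * T - s)) x)) hx).mp rfl
    nlinarith [hc.2]
  · omega

theorem pvNeed_self {x : Int} (hx : 0 < x) (s d T : Int) :
    d * T ≤ s + pvNeed s d T x * x :=
  (pvNeed_le_iff hx (pvNeed_nonneg hx s d T)).mp le_rfl

theorem pvNeed_pos {x : Int} (hx : 0 < x) {s d T : Int} (h : s < d * T) :
    1 ≤ pvNeed s d T x := by
  by_contra hq
  have h0 : pvNeed s d T x ≤ 0 := by omega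
  have := (pvNeed_le_iff hx (le_refl (0:Int))).mp h0
  omega

theorem pvNeed_eq_zero {s d T x : Int} (h : d * T ≤ s) : pvNeed s d T x = 0 := by
  unfold pvNeed; rw [if_neg]; omega

theorem pvNeed_mono {x : Int} (hx : 0 < x) {d : Int} (hd : 0 ≤ d) (s : Int) {T T' : Int}
    (hT : T ≤ T') : pvNeed s d T x ≤ pvNeed s d T' x := by
  rw [pvNeed_le_iff hx (pvNeed_nonneg hx s d T')]
  calc d * T ≤ d * T' := mul_le_mul_of_nonneg_left hT hd
    _ ≤ s + pvNeed s d T' x * x := pvNeed_self hx s d T'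

theorem pvNeed_step {x : Int} (hx : 0 < x) {s d T : Int} (h : s < d * T) :
    pvNeed (s + x) d T x = pvNeed s d T x - 1 := by
  have hq1 : 1 ≤ pvNeed s d T x := pvNeed_pos hx h
  have hmin : d * T ≤ s + pvNeed s d T x * x := pvNeed_self hx s d T
  have hle : pvNeed (s + x) d T x ≤ pvNeed s d T x - 1 := by
    rw [pvNeed_le_iff hx (by omega)]; nlinarith
  have hge : pvNeed s d T x ≤ pvNeed (s + x) d T x + 1 := by
    have h2 : d * T ≤ (s + x) + pvNeed (s + x) d T x * x := pvNeed_self hx (s + x) d T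
    rw [pvNeed_le_iff hx (by have := pvNeed_nonneg hx (s + x) d T; omega)]
    nlinarith
  omega

theorem pvCost_mono {x : Int} (hx : 0 < x) (a b c : Int) {T T' : Int} (hT : T ≤ T') :
    pvCost a b c x T ≤ pvCost a b c x T' := by
  rw [pvCost_eq, pvCost_eq]
  have h1 := pvNeed_mono hx (d := 30) (by norm_num) a (T := T) (T' := T') hT
  have h2 := pvNeed_mono hx (d := 2) (by norm_num) b (T := T) (T' := T') hT
  have h3 := pvNeed_mono hx (d := 50) (by norm_num) c (T := T) (T' := T') hT
  omega

theorem pvCost_zero {a b c x T : Int} (h : T ≤ gmin a b c) : pvCost a b c x T = 0 := by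
  have e1 := PySem.Int.floordiv_eq_ediv_of_pos (a := a) (show (0:Int) < 30 by norm_num)
  have e2 := PySem.Int.floordiv_eq_ediv_of_pos (a := b) (show (0:Int) < 2 by norm_num)
  have e3 := PySem.Int.floordiv_eq_ediv_of_pos (a := c) (show (0:Int) < 50 by norm_num)
  unfold gmin at h
  rw [pvCost_eq, pvNeed_eq_zero (by omega), pvNeed_eq_zero (by omega), pvNeed_eq_zero (by omega)]
  ring

theorem pvCost_pos {x : Int} (hx : 0 < x) {a b c T : Int} (h : gmin a b c < T) :
    1 ≤ pvCost a b c x T := by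
  have e1 := PySem.Int.floordiv_eq_ediv_of_pos (a := a) (show (0:Int) < 30 by norm_num)
  have e2 := PySem.Int.floordiv_eq_ediv_of_pos (a := b) (show (0:Int) < 2 by norm_num)
  have e3 := PySem.Int.floordiv_eq_ediv_of_pos (a := c) (show (0:Int) < 50 by norm_num)
  have h1 := pvNeed_nonneg hx a 30 T
  have h2 := pvNeed_nonneg hx b 2 T
  have h3 := pvNeed_nonneg hx c 50 T
  unfold gmin at h
  rw [pvCost_eq]
  rcases (show PySem.Int.floordiv a 30 < T ∨ PySem.Int.floordiv b 2 < T ∨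
      PySem.Int.floordiv c 50 < T by omega) with hj | hj | hj
  · have := pvNeed_pos hx (s := a) (d := 30) (T := T) (by omega); omega
  · have := pvNeed_pos hx (s := b) (d := 2) (T := T) (by omega); omega
  · have := pvNeed_pos hx (s := c) (d := 50) (T := T) (by omega); omega

-- upper bound for the binary search: base + k*x + 1 tarts are not reachable
theorem pvCost_hi {x k : Int} (hx : 0 < x) (hk : 1 ≤ k) (a b c : Int) :
    k < pvCost a b c x (gmin a b c + k * x + 1) := by
  have e1 := PySem.Int.floordiv_eq_ediv_of_pos (a := a) (show (0:Int) < 30 by norm_num)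
  have e2 := PySem.Int.floordiv_eq_ediv_of_pos (a := b) (show (0:Int) < 2 by norm_num)
  have e3 := PySem.Int.floordiv_eq_ediv_of_pos (a := c) (show (0:Int) < 50 by norm_num)
  have ht : 1 ≤ k * x := by nlinarith
  set T := gmin a b c + k * x + 1 with hT
  have h1 := pvNeed_nonneg hx a 30 T
  have h2 := pvNeed_nonneg hx b 2 T
  have h3 := pvNeed_nonneg hx c 50 T
  rw [pvCost_eq]
  have hbig : ∀ s d : Int, 2 ≤ d → PySem.Int.floordiv s d = gmin a b c → s < d * gmin a b c + d →
      k < pvNeed s d T x := by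
    intro s d hd hs hlt
    by_contra hle
    have := (pvNeed_le_iff hx (show (0:Int) ≤ k by omega)).mp (by omega : pvNeed s d T x ≤ k)
    nlinarith
  have hcases : PySem.Int.floordiv a 30 = gmin a b c ∨ PySem.Int.floordiv b 2 = gmin a b c ∨
      PySem.Int.floordiv c 50 = gmin a b c := by unfold gmin; omega
  rcases hcases with hj | hj | hj
  · have := hbig a 30 (by norm_num) hj (by omega); omega
  · have := hbig b 2 (by norm_num) hj (by omega); omega
  · have := hbig c 50 (by norm_num) hj (by omega); omega

-- characterisation is unique
theorem pvChar_unique {x k : Int} (hx : 0 < x) (a b c : Int) {r g : Int}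
    (hr1 : pvCost a b c x r ≤ k) (hr2 : k < pvCost a b c x (r + 1))
    (hg1 : pvCost a b c x g ≤ k) (hg2 : k < pvCost a b c x (g + 1)) : r = g := by
  rcases lt_trichotomy r g with h | h | h
  · have := pvCost_mono hx a b c (show r + 1 ≤ g by omega); omega
  · exact h
  · have := pvCost_mono hx a b c (show g + 1 ≤ r by omega); omega

-- one-step unfolding of A's loop (the lets are definitional)
theorem pvLoopA_succ (n : Nat) (a b c x : Int) :
    pvLoopA (n+1) a b c x =
      (if PySem.Int.floordiv a 30 =
            min (min (PySem.Int.floordiv a 30) (PySem.Int.floordiv b 2)) (PySem.Int.floordiv c 50)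
       then pvLoopA n (a + x) b c x
       else if PySem.Int.floordiv b 2 =
            min (min (PySem.Int.floordiv a 30) (PySem.Int.floordiv b 2)) (PySem.Int.floordiv c 50)
       then pvLoopA n a (b + x) c x
       else if PySem.Int.floordiv c 50 =
            min (min (PySem.Int.floordiv a 30) (PySem.Int.floordiv b 2)) (PySem.Int.floordiv c 50)
       then pvLoopA n a b (c + x) x
       else pvLoopA n a b c x) := rfl

def gres (n : Nat) (a b c x : Int) : Int :=
  gmin ((pvLoopA n a b c x).1) ((pvLoopA n a b c x).2.1) ((pvLoopA n a b c x).2.2)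

theorem gres_eq (n : Nat) (a b c x : Int) :
    gmin ((pvLoopA n a b c x).1) ((pvLoopA n a b c x).2.1) ((pvLoopA n a b c x).2.2) =
      gres n a b c x := rfl

-- A's greedy result is exactly characterised by the cost function
theorem greedy_char {x : Int} (hx : 0 < x) :
    ∀ (n : Nat) (a b c : Int),
      pvCost a b c x (gres n a b c x) ≤ (n : Int) ∧
      (n : Int) < pvCost a b c x (gres n a b c x + 1) := by
  intro n
  induction n with
  | zero =>
    intro a b c
    constructor
    · rw [show gres 0 a b c x = gmin a b c from rfl, pvCost_zero le_rfl]
      simp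
    · have := pvCost_pos hx (a := a) (b := b) (c := c)
        (T := gres 0 a b c x + 1) (by rw [show gres 0 a b c x = gmin a b c from rfl]; omega)
      omega
  | succ n ih =>
    intro a b c
    have e1 := PySem.Int.floordiv_eq_ediv_of_pos (a := a) (show (0:Int) < 30 by norm_num)
    have e2 := PySem.Int.floordiv_eq_ediv_of_pos (a := b) (show (0:Int) < 2 by norm_num)
    have e3 := PySem.Int.floordiv_eq_ediv_of_pos (a := c) (show (0:Int) < 50 by norm_num)
    rw [show gres (n+1) a b c x =
        gmin ((pvLoopA (n+1) a b c x).1) ((pvLoopA (n+1) a b c x).2.1) ((pvLoopA (n+1) a b c x).2.2)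
      from rfl, pvLoopA_succ]
    split_ifs with h1 h2 h3
    · -- flour purchased
      rw [gres_eq]
      obtain ⟨ih1, ih2⟩ := ih (a + x) b c
      set G := gres n (a + x) b c x with hG
      have hbase' : gmin (a + x) b c ≤ G := by
        by_contra hlt
        rw [pvCost_zero (by omega : G + 1 ≤ gmin (a + x) b c)] at ih2; omega
      have hmono : gmin a b c ≤ gmin (a + x) b c := by
        have e1' := PySem.Int.floordiv_eq_ediv_of_pos (a := a + x) (show (0:Int) < 30 by norm_num)
        unfold gmin; omega
      have hstep : ∀ T, gmin a b c < T →
          pvCost a b c x T = pvCost (a + x) b c x T + 1 := by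
        intro T hT
        have hflour : a < 30 * T := by unfold gmin at hT h1; omega
        rw [pvCost_eq, pvCost_eq, pvNeed_step hx hflour]
        have := pvNeed_pos hx hflour
        ring
      by_cases hGb : gmin a b c < G
      · constructor
        · rw [hstep G hGb]; omega
        · rw [hstep (G + 1) (by omega)]; omega
      · have hGeq : G = gmin a b c := by omega
        constructor
        · rw [pvCost_zero (by omega : G ≤ gmin a b c)]; omega
        · rw [hstep (G + 1) (by omega)]; omega
    · -- eggs purchased
      rw [gres_eq]
      obtain ⟨ih1, ih2⟩ := ih a (b + x) c
      set G := gres n a (b + x) c x with hG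
      have hbase' : gmin a (b + x) c ≤ G := by
        by_contra hlt
        rw [pvCost_zero (by omega : G + 1 ≤ gmin a (b + x) c)] at ih2; omega
      have hmono : gmin a b c ≤ gmin a (b + x) c := by
        have e2' := PySem.Int.floordiv_eq_ediv_of_pos (a := b + x) (show (0:Int) < 2 by norm_num)
        unfold gmin; omega
      have hstep : ∀ T, gmin a b c < T →
          pvCost a b c x T = pvCost a (b + x) c x T + 1 := by
        intro T hT
        have hegg : b < 2 * T := by unfold gmin at hT h2; omega
        rw [pvCost_eq, pvCost_eq, pvNeed_step hx hegg]
        have := pvNeed_pos hx hegg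
        ring
      by_cases hGb : gmin a b c < G
      · constructor
        · rw [hstep G hGb]; omega
        · rw [hstep (G + 1) (by omega)]; omega
      · have hGeq : G = gmin a b c := by omega
        constructor
        · rw [pvCost_zero (by omega : G ≤ gmin a b c)]; omega
        · rw [hstep (G + 1) (by omega)]; omega
    · -- milk purchased
      rw [gres_eq]
      obtain ⟨ih1, ih2⟩ := ih a b (c + x)
      set G := gres n a b (c + x) x with hG
      have hbase' : gmin a b (c + x) ≤ G := by
        by_contra hlt
        rw [pvCost_zero (by omega : G + 1 ≤ gmin a b (c + x))] at ih2; omega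
      have hmono : gmin a b c ≤ gmin a b (c + x) := by
        have e3' := PySem.Int.floordiv_eq_ediv_of_pos (a := c + x) (show (0:Int) < 50 by norm_num)
        unfold gmin; omega
      have hstep : ∀ T, gmin a b c < T →
          pvCost a b c x T = pvCost a b (c + x) x T + 1 := by
        intro T hT
        have hmilk : c < 50 * T := by unfold gmin at hT h3; omega
        rw [pvCost_eq, pvCost_eq, pvNeed_step hx hmilk]
        have := pvNeed_pos hx hmilk
        ring
      by_cases hGb : gmin a b c < G
      · constructor
        · rw [hstep G hGb]; omega
        · rw [hstep (G + 1) (by omega)]; omega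
      · have hGeq : G = gmin a b c := by omega
        constructor
        · rw [pvCost_zero (by omega : G ≤ gmin a b c)]; omega
        · rw [hstep (G + 1) (by omega)]; omega
    · exact absurd (by omega : PySem.Int.floordiv c 50 =
        min (min (PySem.Int.floordiv a 30) (PySem.Int.floordiv b 2)) (PySem.Int.floordiv c 50)) h3

-- the binary-search loop maintains 'cost lo ≤ k < cost (hi+1)' and ends with lo = hi
theorem pvBS_inv (Aq Bq Cq k x : Int) (hx : 0 < x) :
    ∀ (N : Nat) (lo hi : Int), (hi - lo).toNat = N → lo ≤ hi →
      pvCost Aq Bq Cq x lo ≤ k → k < pvCost Aq Bq Cq x (hi + 1) →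
      pvCost Aq Bq Cq x (pvBS Aq Bq Cq k x lo hi) ≤ k ∧
      k < pvCost Aq Bq Cq x (pvBS Aq Bq Cq k x lo hi + 1) := by
  intro N
  induction N using Nat.strong_induction_on with
  | _ N ihN =>
    intro lo hi hN hle hlo hhi
    rw [pvBS]
    split_ifs with h hmid
    · have hm := PySem.Int.floordiv_two_mid_bounds (show lo + 1 ≤ hi by omega)
      rw [show lo + 1 + hi = lo + hi + 1 by ring] at hm
      exact ihN ((hi - PySem.Int.floordiv (lo + hi + 1) 2).toNat) (by omega) _ hi rfl
        (by omega) hmid hhi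
    · have hm := PySem.Int.floordiv_two_mid_bounds (show lo + 1 ≤ hi by omega)
      rw [show lo + 1 + hi = lo + hi + 1 by ring] at hm
      refine ihN ((PySem.Int.floordiv (lo + hi + 1) 2 - 1 - lo).toNat) (by omega) lo _ rfl
        (by omega) hlo ?_
      rw [show PySem.Int.floordiv (lo + hi + 1) 2 - 1 + 1 =
        PySem.Int.floordiv (lo + hi + 1) 2 by ring]
      omega
    · have : lo = hi := by omega
      subst this
      exact ⟨hlo, hhi⟩

-- when hi ≤ lo the binary-search loop never runs
theorem pvBS_stop {Aq Bq Cq k x lo hi : Int} (h : ¬ lo < hi) :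
    pvBS Aq Bq Cq k x lo hi = lo := by
  rw [pvBS, dif_neg h]

-- x = 0: A's loop adds 0 to some material, leaving the state unchanged
theorem pvLoopA_zero : ∀ (n : Nat) (a b c : Int), pvLoopA n a b c 0 = (a, b, c) := by
  intro n
  induction n with
  | zero => intro a b c; rfl
  | succ n ih =>
    intro a b c
    rw [pvLoopA_succ]
    split_ifs <;> simp only [add_zero, ih]

-- ===== VERDICT (by name: the statement is the Claim_ definition above) =====
theorem find_best_purchase_spec : Claim_equal_find_best_purchase := by
  intro A B C k x _ hpre
  unfold Spec_find_best_purchase find_best_purchase find_best_purchase_alt calculate_max_tarts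
  have hx0 : 0 ≤ x := hpre
  by_cases hkx : k * x ≤ 0
  · -- the search interval is empty: both sides return the base capacity
    rw [pvBS_stop (by omega)]
    have hko : k ≤ 0 ∨ x = 0 := by
      by_contra hc
      push_neg at hc
      have hxp : 0 < x := lt_of_le_of_ne hx0 (Ne.symm hc.2)
      exact absurd (mul_pos hc.1 hxp) (by omega)
    rcases hko with hk | hx
    · rw [show k.toNat = 0 by omega]; rfl
    · subst hx; rw [pvLoopA_zero]
  · have hx : 0 < x := by
      rcases lt_or_eq_of_le hx0 with h | h
      · exact h
      · exfalso; rw [← h] at hkx; omega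
    have hk1 : 1 ≤ k := by nlinarith
    have hkn : ((k.toNat : Int)) = k := by omega
    have hBS := pvBS_inv A B C k x hx
      ((gmin A B C + k * x - gmin A B C).toNat) (gmin A B C) (gmin A B C + k * x) rfl
      (by omega) (by rw [pvCost_zero le_rfl]; omega)
      (by have := pvCost_hi hx hk1 A B C; omega)
    have hG := greedy_char hx k.toNat A B C
    rw [hkn] at hG
    exact pvChar_unique hx A B C hG.1 hG.2 hBS.1 hBS.2
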